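-- pv_equiv track=rewrite | github.com/kevinabrandon/vectorscope | vectorscope/platonic.py | _find_euler_trail
-- ===== SOURCE A (Python) =====
-- from collections import defaultdict
--
-- def _find_euler_trail(edges):
--     """Find an Euler trail or circuit using Hierholzer's algorithm.
--
--     Returns a list of directed (start, end) edges, or None if no Euler
--     trail exists (requires 0 or 2 odd-degree vertices).
--     """
--     if not edges:
--         return []
--
--     adj = defaultdict(list)
--     for idx, (a, b) in enumerate(edges):
--         adj[a].append((b, idx))
--         adj[b].append((a, idx))
--
--     odd_verts = [v for v in adj if len(adj[v]) % 2 != 0]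
--     if len(odd_verts) not in (0, 2):
--         return None
--
--     # Start from an odd-degree vertex if any, else any vertex
--     start = odd_verts[0] if odd_verts else next(iter(adj))
--
--     # Hierholzer's: walk edges, backtrack when stuck
--     used = set()
--     adj_idx = {v: 0 for v in adj}
--     stack = [start]
--     trail_verts = []
--
--     while stack:
--         v = stack[-1]
--         found = False
--         while adj_idx[v] < len(adj[v]):
--             w, idx = adj[v][adj_idx[v]]
--             adj_idx[v] += 1
--             if idx not in used:
--                 used.add(idx)
--                 stack.append(w)
--                 found = True
--                 break
--         if not found:
--             trail_verts.append(stack.pop())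
--
--     if len(used) != len(edges):
--         return None
--
--     trail_verts.reverse()
--     return [(trail_verts[i], trail_verts[i + 1])
--             for i in range(len(trail_verts) - 1)]
-- ===== SOURCE B (Python) =====
-- from collections import defaultdict, deque
--
-- def _find_euler_trail(edges):
--     """Euler trail/circuit (Hierholzer). Alternative state: instead of keeping
--     full adjacency lists plus per-vertex scan counters, consume each vertex's
--     adjacency queue destructively, and pair the trail with zip instead of an
--     index comprehension."""
--     if not edges:
--         return []
--
--     adj = defaultdict(list)
--     for idx, (a, b) in enumerate(edges):
--         adj[a].append((b, idx))
--         adj[b].append((a, idx))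
--
--     odd_verts = [v for v in adj if len(adj[v]) % 2 != 0]
--     if len(odd_verts) not in (0, 2):
--         return None
--
--     start = odd_verts[0] if odd_verts else next(iter(adj))
--
--     rem = {v: deque(l) for v, l in adj.items()}
--     used = set()
--     stack = [start]
--     trail_verts = []
--
--     while stack:
--         v = stack[-1]
--         r = rem[v]
--         while r and r[0][1] in used:
--             r.popleft()
--         if r:
--             w, idx = r.popleft()
--             used.add(idx)
--             stack.append(w)
--         else:
--             trail_verts.append(stack.pop())
--
--     if len(used) != len(edges):
--         return None
--
--     trail_verts.reverse()
--     return list(zip(trail_verts, trail_verts[1:]))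
-- ===== Notes on version B (the rewrite author's own statement) =====
-- stated objective: alternative
-- what changed: B drops A's adjacency-list-plus-per-vertex-scan-counter state (adj_idx dict, inner while with found flag/break) and instead consumes each vertex's adjacency deque destructively (skip used edges at the front, popleft the next edge), and pairs the trail with zip(trail, trail[1:]) instead of an index-range comprehension.
import Mathlib
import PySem

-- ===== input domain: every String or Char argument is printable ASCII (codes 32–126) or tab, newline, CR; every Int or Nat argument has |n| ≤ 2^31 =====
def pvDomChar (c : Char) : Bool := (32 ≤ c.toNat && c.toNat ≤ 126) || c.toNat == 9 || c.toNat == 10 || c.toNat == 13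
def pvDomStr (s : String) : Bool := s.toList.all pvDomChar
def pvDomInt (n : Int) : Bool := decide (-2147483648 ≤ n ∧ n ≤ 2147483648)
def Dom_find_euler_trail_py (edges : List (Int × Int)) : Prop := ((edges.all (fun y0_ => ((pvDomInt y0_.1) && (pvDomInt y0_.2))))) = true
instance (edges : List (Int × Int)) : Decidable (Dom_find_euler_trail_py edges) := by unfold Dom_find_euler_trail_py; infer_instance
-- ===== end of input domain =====

-- B replaces A's adjacency-plus-scan-counter state by destructively consumed
-- adjacency queues and pairs the trail with zip instead of an index
-- comprehension (objective: alternative; same traversal order, same output).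

-- ===== PORT A =====
-- adj = defaultdict(list); for idx,(a,b) in enumerate(edges): adj[a].append((b,idx)); adj[b].append((a,idx))
def pvAdjA (edges : List (Int × Int)) : PySem.Dict Int (List (Int × Int)) :=
  (PySem.List.enumerate edges 0).foldl
    (fun d p => (d.modify p.2.1 [] (· ++ [(p.2.2, p.1)])).modify p.2.2 [] (· ++ [(p.2.1, p.1)]))
    PySem.Dict.empty

-- the inner 'while adj_idx[v] < len(adj[v])' scan; returns the final adj_idx[v],
-- the updated used set, and the pushed neighbour if an unused edge was found.
-- (adj_idx[v] / adj[v] lookups are ported as getD: the keys are always present.)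
def pvInnerA (l : List (Int × Int)) (i : Int) (used : PySem.Set Int) :
    Int × PySem.Set Int × Option Int :=
  if h : i < PySem.List.len l then
    let p := PySem.List.pyGetD l i (0, 0)
    if p.2 ∈ used then pvInnerA l (i + 1) used
    else (i + 1, PySem.Set.add used p.2, some p.1)
  else (i, used, none)
termination_by (PySem.List.len l - i).toNat
decreasing_by simp only [PySem.List.len_eq] at h ⊢; omega

-- the outer 'while stack' loop; the stack list is kept top-first; the fuel
-- argument only makes the recursion total (2*len(edges)+2 always suffices).
def pvLoopA (adj : PySem.Dict Int (List (Int × Int))) :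
    Nat → List Int → PySem.Dict Int Int → PySem.Set Int → List Int →
    PySem.Set Int × List Int
  | 0, _, _, used, trail => (used, trail)
  | _ + 1, [], _, used, trail => (used, trail)
  | n + 1, v :: rest, ai, used, trail =>
    match pvInnerA (adj.getD v []) (ai.getD v 0) used with
    | (i', used', some w) => pvLoopA adj n (w :: v :: rest) (ai.insert v i') used' trail
    | (i', used', none)   => pvLoopA adj n rest (ai.insert v i') used' (trail ++ [v])

def find_euler_trail_py (edges : List (Int × Int)) : Option (List (Int × Int)) :=
  if edges = [] then some []
  else
    let adj := pvAdjA edges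
    let odd_verts := adj.keys.filter
      (fun v => PySem.Int.mod (PySem.List.len (adj.getD v [])) 2 != 0)
    if ¬ (odd_verts.length = 0 ∨ odd_verts.length = 2) then none
    else
      -- odd_verts[0] if odd_verts else next(iter(adj)); adj is nonempty here
      let start := odd_verts.headD (adj.keys.headD 0)
      let ai := adj.keys.foldl (fun d u => d.insert u 0) PySem.Dict.empty
      let r := pvLoopA adj (2 * edges.length + 2) [start] ai PySem.Set.empty []
      if PySem.Set.len r.1 != PySem.List.len edges then none
      else
        let tr := r.2.reverse
        some ((PySem.List.pyRange 0 (PySem.List.len tr - 1) 1).map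
          (fun i => (PySem.List.pyGetD tr i 0, PySem.List.pyGetD tr (i + 1) 0)))

-- ===== PORT B =====
def pvAdjB (edges : List (Int × Int)) : PySem.Dict Int (List (Int × Int)) :=
  (PySem.List.enumerate edges 0).foldl
    (fun d p => (d.modify p.2.1 [] (· ++ [(p.2.2, p.1)])).modify p.2.2 [] (· ++ [(p.2.1, p.1)]))
    PySem.Dict.empty

-- rem = {v: deque(l) for v, l in adj.items()}
def pvRemB (adj : PySem.Dict Int (List (Int × Int))) : PySem.Dict Int (List (Int × Int)) :=
  adj.items.foldl (fun d p => d.insert p.1 p.2) PySem.Dict.empty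

-- while r and r[0][1] in used: r.popleft()   (queue front = list head)
def pvSkipB (r : List (Int × Int)) (used : PySem.Set Int) : List (Int × Int) :=
  match r with
  | [] => []
  | p :: t => if p.2 ∈ used then pvSkipB t used else p :: t

-- the outer 'while stack' loop of B; stack kept top-first, same fuel as A.
def pvLoopB :
    Nat → List Int → PySem.Dict Int (List (Int × Int)) → PySem.Set Int → List Int →
    PySem.Set Int × List Int
  | 0, _, _, used, trail => (used, trail)
  | _ + 1, [], _, used, trail => (used, trail)
  | n + 1, v :: rest, rem, used, trail =>
    match pvSkipB (rem.getD v []) used with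
    | (w, idx) :: r' => pvLoopB n (w :: v :: rest) (rem.insert v r') (PySem.Set.add used idx) trail
    | [] => pvLoopB n rest (rem.insert v []) used (trail ++ [v])

def find_euler_trail_py_alt (edges : List (Int × Int)) : Option (List (Int × Int)) :=
  if edges = [] then some []
  else
    let adj := pvAdjB edges
    let odd_verts := adj.keys.filter
      (fun v => PySem.Int.mod (PySem.List.len (adj.getD v [])) 2 != 0)
    if ¬ (odd_verts.length = 0 ∨ odd_verts.length = 2) then none
    else
      let start := odd_verts.headD (adj.keys.headD 0)
      let rem := pvRemB adj
      let r := pvLoopB (2 * edges.length + 2) [start] rem PySem.Set.empty []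
      if PySem.Set.len r.1 != PySem.List.len edges then none
      else
        let tr := r.2.reverse
        some (tr.zip (PySem.List.slice tr (some 1) none))

-- ===== PRECONDITION & SPEC =====
def Spec_find_euler_trail_py (edges : List (Int × Int)) (out : Option (List (Int × Int))) : Prop := out = find_euler_trail_py_alt edges
instance (edges : List (Int × Int)) (out : Option (List (Int × Int))) : Decidable (Spec_find_euler_trail_py edges out) := by unfold Spec_find_euler_trail_py; infer_instance

-- ===== CLAIM (what is proved, stated in full; the proofs are below) =====
def Claim_equal_find_euler_trail_py : Prop := ∀ (edges : List (Int × Int)), Dom_find_euler_trail_py edges → Spec_find_euler_trail_py edges (find_euler_trail_py edges)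

-- ===== LEMMAS AND PROOFS =====

-- the invariant tying A's (adj, adj_idx) to B's rem: rem[v] is the unscanned
-- suffix of adj[v].
def pvInv (adj : PySem.Dict Int (List (Int × Int))) (ai : PySem.Dict Int Int)
    (rem : PySem.Dict Int (List (Int × Int))) : Prop :=
  ∀ v, 0 ≤ ai.getD v 0 ∧ ai.getD v 0 ≤ PySem.List.len (adj.getD v []) ∧
    rem.getD v [] = (adj.getD v []).drop (ai.getD v 0).toNat

theorem pvInner_skip (l : List (Int × Int)) (used : PySem.Set Int) :
    ∀ (k : Nat) (i : Int), 0 ≤ i → i ≤ (l.length : Int) → l.length ≤ i.toNat + k →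
    (pvSkipB (l.drop i.toNat) used = [] →
      pvInnerA l i used = ((l.length : Int), used, none)) ∧
    (∀ w idx r', pvSkipB (l.drop i.toNat) used = (w, idx) :: r' →
      pvInnerA l i used = (((l.length - r'.length : Nat) : Int), PySem.Set.add used idx, some w) ∧
      l.drop (l.length - r'.length) = r') := by
  intro k
  induction k with
  | zero =>
    intro i h0 h1 hk
    have hlen : i = (l.length : Int) := by omega
    have hdrop : l.drop i.toNat = [] := List.drop_eq_nil_of_le (by omega)
    rw [hdrop]
    constructor
    · intro _
      rw [pvInnerA.eq_def]
      simp only [PySem.List.len_eq]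
      rw [dif_neg (by omega)]
      rw [hlen]
    · intro w idx r' hcons
      simp [pvSkipB] at hcons
  | succ k ih =>
    intro i h0 h1 hk
    by_cases h : i < (l.length : Int)
    · have hlt : i.toNat < l.length := by omega
      have hx : l.drop i.toNat = l[i.toNat] :: l.drop (i.toNat + 1) :=
        (List.getElem_cons_drop hlt).symm
      have hget : PySem.List.pyGetD l i (0, 0) = l[i.toNat] :=
        PySem.List.pyGetD_eq_getElem l (0, 0) h0 (by exact_mod_cast h)
      by_cases hu : (l[i.toNat]).2 ∈ used
      · -- used edge: both sides skip it
        have hstep : pvSkipB (l.drop i.toNat) used = pvSkipB (l.drop (i + 1).toNat) used := by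
          have ht : (i + 1).toNat = i.toNat + 1 := by omega
          rw [hx, pvSkipB, if_pos hu, ht]
        have hrec := ih (i + 1) (by omega) (by omega) (by omega)
        rw [hstep]
        have hA : pvInnerA l i used = pvInnerA l (i + 1) used := by
          rw [pvInnerA.eq_def]
          simp only [PySem.List.len_eq]
          rw [dif_pos h]
          simp only [hget, if_pos hu]
        rw [hA]
        exact hrec
      · -- unused edge: found
        have hskip : pvSkipB (l.drop i.toNat) used = l[i.toNat] :: l.drop (i.toNat + 1) := by
          rw [hx, pvSkipB, if_neg hu]
        constructor
        · intro hnil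
          rw [hskip] at hnil
          cases hnil
        · intro w idx r' hcons
          rw [hskip] at hcons
          obtain ⟨hhead, hw3⟩ := List.cons_eq_cons.mp hcons
          have hw1 : w = (l[i.toNat]).1 := by rw [hhead]
          have hw2 : idx = (l[i.toNat]).2 := by rw [hhead]
          have hr'len : r'.length = l.length - (i.toNat + 1) := by
            rw [← hw3, List.length_drop]
          have hIdx : l.length - r'.length = i.toNat + 1 := by omega
          constructor
          · rw [pvInnerA.eq_def]
            simp only [PySem.List.len_eq]
            rw [dif_pos h]
            simp only [hget, if_neg hu]
            rw [hIdx, hw1, hw2]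
            congr 1
            omega
          · rw [hIdx, ← hw3]
    · -- i = len l: exhausted
      have hlen : i = (l.length : Int) := by omega
      have hdrop : l.drop i.toNat = [] := List.drop_eq_nil_of_le (by omega)
      rw [hdrop]
      constructor
      · intro _
        rw [pvInnerA.eq_def]
        simp only [PySem.List.len_eq]
        rw [dif_neg (by omega)]
        rw [hlen]
      · intro w idx r' hcons
        simp [pvSkipB] at hcons

theorem pvLockstep (adj : PySem.Dict Int (List (Int × Int))) :
    ∀ (n : Nat) (st : List Int) (ai : PySem.Dict Int Int)
      (rem : PySem.Dict Int (List (Int × Int))) (used : PySem.Set Int) (trail : List Int),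
      pvInv adj ai rem →
      pvLoopA adj n st ai used trail = pvLoopB n st rem used trail := by
  intro n
  induction n with
  | zero => intro st ai rem used trail _; rfl
  | succ n ih =>
    intro st ai rem used trail hinv
    cases st with
    | nil => rfl
    | cons v rest =>
      obtain ⟨h0, h1, h2⟩ := hinv v
      rw [PySem.List.len_eq] at h1
      have H := pvInner_skip (adj.getD v []) used (adj.getD v []).length
        (ai.getD v 0) h0 h1 (by omega)
      rw [pvLoopA, pvLoopB, h2]
      cases hs : pvSkipB ((adj.getD v []).drop (ai.getD v 0).toNat) used with
      | nil =>
        rw [H.1 hs]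
        apply ih
        intro u
        by_cases hv : u = v
        · subst hv
          rw [PySem.Dict.getD_insert, PySem.Dict.getD_insert, if_pos rfl, if_pos rfl]
          refine ⟨by positivity, by simp [PySem.List.len_eq], ?_⟩
          rw [List.drop_eq_nil_of_le (by simp)]
        · rw [PySem.Dict.getD_insert, PySem.Dict.getD_insert, if_neg hv, if_neg hv]
          exact hinv u
      | cons p r' =>
        obtain ⟨w, idx⟩ := p
        obtain ⟨hA, hdrop⟩ := H.2 w idx r' hs
        rw [hA]
        apply ih
        intro u
        by_cases hv : u = v
        · subst hv
          rw [PySem.Dict.getD_insert, PySem.Dict.getD_insert, if_pos rfl, if_pos rfl]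
          refine ⟨by positivity, ?_, ?_⟩
          · simp only [PySem.List.len_eq]
            omega
          · rw [Int.toNat_natCast, hdrop]
        · rw [PySem.Dict.getD_insert, PySem.Dict.getD_insert, if_neg hv, if_neg hv]
          exact hinv u

theorem pvAi0 (l : List Int) :
    ∀ (d : PySem.Dict Int Int), (∀ v, d.getD v 0 = 0) →
    ∀ v, (l.foldl (fun d u => d.insert u 0) d).getD v 0 = 0 := by
  induction l with
  | nil => intro d h v; exact h v
  | cons x t ih =>
    intro d h v
    apply ih
    intro u
    rw [PySem.Dict.getD_insert]
    split
    · rfl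
    · exact h u

theorem pvNodupKeysAdj (edges : List (Int × Int)) : (pvAdjA edges).keys.Nodup := by
  unfold pvAdjA
  generalize PySem.List.enumerate edges 0 = l
  have main : ∀ (d : PySem.Dict Int (List (Int × Int))), d.keys.Nodup →
      (l.foldl (fun d p => (d.modify p.2.1 [] (· ++ [(p.2.2, p.1)])).modify p.2.2 []
        (· ++ [(p.2.1, p.1)])) d).keys.Nodup := by
    induction l with
    | nil => intro d h; exact h
    | cons x t ih =>
      intro d h
      apply ih
      have step : ∀ (d' : PySem.Dict Int (List (Int × Int))) (k : Int) (f : List (Int × Int) → List (Int × Int)),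
          d'.keys.Nodup → (d'.modify k [] f).keys.Nodup := by
        intro d' k f hd
        rw [PySem.Dict.keys_modify]
        by_cases hc : d'.contains k = true
        · rw [PySem.Dict.keys_insert_of_contains _ _ hc]; exact hd
        · rw [PySem.Dict.keys_insert_of_not_contains _ _ (by simpa using hc)]
          refine List.Nodup.append hd (List.nodup_singleton k) ?_
          intro a ha hb
          simp at hb
          subst hb
          exact hc (by rw [PySem.Dict.contains_iff_mem_keys]; exact ha)
      exact step _ _ _ (step _ _ _ h)
  exact main PySem.Dict.empty PySem.Dict.nodup_keys_empty

theorem pvRem0 (adj : PySem.Dict Int (List (Int × Int))) (h : adj.keys.Nodup) :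
    pvRemB adj = adj := by
  unfold pvRemB
  apply PySem.Dict.ext
  rw [PySem.Dict.items_foldl_insert_fresh adj.items (·.1) (·.2) PySem.Dict.empty
    (fun a _ => PySem.Dict.contains_empty a.1) (by simpa [PySem.Dict.keys] using h)]
  simp [show (PySem.Dict.empty : PySem.Dict Int (List (Int × Int))).items = [] from rfl]

-- A's index-comprehension pairing equals B's zip pairing, for any vertex list
theorem pvZipPairs (tr : List Int) :
    (PySem.List.pyRange 0 (PySem.List.len tr - 1) 1).map
      (fun i => (PySem.List.pyGetD tr i 0, PySem.List.pyGetD tr (i + 1) 0)) =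
    tr.zip (PySem.List.slice tr (some 1) none) := by
  rw [PySem.List.slice_from_one]
  apply List.ext_getElem
  · simp only [List.length_map, PySem.List.length_pyRange_one, List.length_zip,
      List.length_tail, PySem.List.len]
    omega
  · intro k hk1 hk2
    have hlen : k < tr.length - 1 := by
      simp only [List.length_map, PySem.List.length_pyRange_one, PySem.List.len] at hk1
      omega
    simp only [List.getElem_map, List.getElem_zip, List.getElem_tail]
    rw [PySem.List.getElem_pyRange_one]
    have e1 : PySem.List.pyGetD tr ((0 : Int) + (k : Int)) 0 = tr[k] := by
      rw [zero_add, PySem.List.pyGetD_eq_getElem tr 0 (by positivity) (by exact_mod_cast (by omega : k < tr.length))]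
      simp
    have e2 : PySem.List.pyGetD tr ((0 : Int) + (k : Int) + 1) 0 = tr[k + 1] := by
      rw [zero_add]
      have : ((k : Int) + 1) = ((k + 1 : Nat) : Int) := by push_cast; ring
      rw [this, PySem.List.pyGetD_eq_getElem tr 0 (by positivity) (by exact_mod_cast (by omega : k + 1 < tr.length))]
      simp
    rw [e1, e2]

-- ===== VERDICT (by name: the statement is the Claim_ definition above) =====
theorem find_euler_trail_py_spec : Claim_equal_find_euler_trail_py := by
  intro edges _
  unfold Spec_find_euler_trail_py
  unfold find_euler_trail_py find_euler_trail_py_alt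
  have hAB : pvAdjB = pvAdjA := rfl
  rw [hAB]
  by_cases he : edges = []
  · simp [he]
  · rw [if_neg he, if_neg he]
    simp only []
    split
    · rfl
    · have hloop :
          pvLoopA (pvAdjA edges) (2 * edges.length + 2)
            [(((pvAdjA edges).keys.filter
                (fun v => PySem.Int.mod (PySem.List.len ((pvAdjA edges).getD v [])) 2 != 0)).headD
              ((pvAdjA edges).keys.headD 0))]
            ((pvAdjA edges).keys.foldl (fun d u => d.insert u 0) PySem.Dict.empty)
            PySem.Set.empty [] =
          pvLoopB (2 * edges.length + 2)
            [(((pvAdjA edges).keys.filter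
                (fun v => PySem.Int.mod (PySem.List.len ((pvAdjA edges).getD v [])) 2 != 0)).headD
              ((pvAdjA edges).keys.headD 0))]
            (pvRemB (pvAdjA edges)) PySem.Set.empty [] := by
        apply pvLockstep
        intro v
        have hai := pvAi0 (pvAdjA edges).keys PySem.Dict.empty
          (fun u => PySem.Dict.getD_empty u 0) v
        rw [hai, pvRem0 _ (pvNodupKeysAdj edges)]
        exact ⟨le_refl 0, by simp [PySem.List.len], by simp⟩
      rw [← hloop]
      split
      · rfl
      · rw [pvZipPairs]
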